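-- pv_equiv track=rewrite | github.com/GSmithApps/hindent | new_parser.py | parse_newlang_to_python
-- ===== SOURCE A (Python) =====
-- def parse_newlang_to_python(input_code: str) -> str:
--     lines = input_code.strip().split('\n')
--     python_code = []
--     stack = []  # Stack to keep track of (indentation level, 'co(' or ', co(')
--
--     for line in lines:
--         if not line.strip():  # Skip empty lines
--             continue
--         indent = len(line) - len(line.lstrip())
--         # Determine the current line's content without leading spaces
--         content = line.lstrip()
--
--         # Handle function calls (lines starting with '}')
--         if content.startswith('}'):
--             func_name = content[1:].strip()
--             while stack and indent <= stack[-1][0]: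
--                 stack.pop()
--                 python_code.append(')')
--             prefix = '' if not stack else ', '
--             python_code.append(f"{prefix}co({func_name}")
--             stack.append((indent, 'co('))
--         else:
--             # It's an argument to a function
--             python_code.append(f", {content}")
--
--     # Close any remaining open 'co' calls
--     while stack:
--         stack.pop()
--         python_code.append(')')
--
--     return ''.join(python_code)
-- ===== SOURCE B (Python) =====
-- def parse_newlang_to_python(input_code: str) -> str:
--     lines = [l for l in input_code.strip().split('\n') if l.strip()]
--
--     def parse_level(rest, parent_indent, inside_call):
--         # returns (emitted text, unconsumed lines)
--         out = []
--         while rest: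
--             line = rest[0]
--             content = line.lstrip()
--             if content.startswith('}'):
--                 indent = len(line) - len(content)
--                 if indent <= parent_indent:
--                     break  # this '}' closes an enclosing call
--                 out.append(('' if not inside_call else ', ') + 'co(' + content[1:].strip())
--                 inner, rest = parse_level(rest[1:], indent, True)
--                 out.append(inner + ')')
--             else:
--                 out.append(', ' + content)
--                 rest = rest[1:]
--         return ''.join(out), rest
--
--     return parse_level(lines, -1, False)[0]
-- ===== Notes on version B (the rewrite author's own statement) =====
-- stated objective: alternative
-- what changed: Replaces A's explicit indent stack (pop loop per '}' line plus a final drain) with recursive descent over the pre-filtered non-empty lines: one recursion level per open call returns its emitted text and the unconsumed lines, emitting the closing ')' as each level unwinds.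
import Mathlib
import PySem

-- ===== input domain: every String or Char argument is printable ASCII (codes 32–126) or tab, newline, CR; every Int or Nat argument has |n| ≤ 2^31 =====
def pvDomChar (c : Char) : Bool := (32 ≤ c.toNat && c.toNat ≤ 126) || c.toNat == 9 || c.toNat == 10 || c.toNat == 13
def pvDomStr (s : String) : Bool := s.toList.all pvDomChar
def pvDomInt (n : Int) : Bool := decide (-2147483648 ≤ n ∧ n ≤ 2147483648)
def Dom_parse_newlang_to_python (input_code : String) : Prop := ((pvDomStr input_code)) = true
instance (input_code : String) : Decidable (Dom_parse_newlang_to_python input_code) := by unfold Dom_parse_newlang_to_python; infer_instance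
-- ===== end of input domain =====

-- B replaces A's explicit indent stack with recursive descent over the filtered lines
-- (one recursion level per open call); objective: alternative decomposition, same cost.


-- ===== PORT A =====
-- Python's end-of-list stack is represented head-first (append = cons, stack[-1] = head, pop = tail): exact.
-- the inner `while stack and indent <= stack[-1][0]: stack.pop(); python_code.append(')')` loop:
def A_pop (indent : Int) : List (Int × String) → List String → List (Int × String) × List String
  | [], code => ([], code)
  | (i, s) :: st, code =>
      if indent ≤ i then A_pop indent st (code ++ [")"]) else ((i, s) :: st, code)

-- the final `while stack: stack.pop(); python_code.append(')')` loop: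
def A_final : List (Int × String) → List String → List String
  | [], code => code
  | _ :: st, code => A_final st (code ++ [")"])

-- the body of `for line in lines:` (state = (python_code, stack)):
def A_step (acc : List String × List (Int × String)) (line : String) : List String × List (Int × String) :=
  let (python_code, stack) := acc
  if PySem.Str.strip line = "" then (python_code, stack)  -- skip empty lines
  else
    let indent : Int := (PySem.Str.len line : Int) - (PySem.Str.len (PySem.Str.lstrip line) : Int)
    let content := PySem.Str.lstrip line
    if PySem.Str.startswith content "}" then
      let func_name := PySem.Str.strip (PySem.Str.slice content (some 1) none)
      let (stack', code') := A_pop indent stack python_code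
      let prefixS := if stack' = [] then "" else ", "
      (code' ++ [prefixS ++ "co(" ++ func_name], (indent, "co(") :: stack')
    else
      (python_code ++ [", " ++ content], stack)

def parse_newlang_to_python (input_code : String) : String :=
  -- split? is `some` here: the separator "\n" is non-empty
  let lines := (PySem.Str.split? (PySem.Str.strip input_code) "\n").getD []
  let res := lines.foldl A_step ([], [])
  PySem.Str.join "" (A_final res.2 res.1)

-- ===== PORT B =====
-- Source B's parse_level: recursion over the remaining (filtered) lines; returns (emitted text,
-- unconsumed lines).  The fuel argument is only a totality guard (fuel > number of remaining
-- lines always suffices; the top call passes lines.length + 1).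
def B_parse : Nat → List String → Int → Bool → String × List String
  | 0, rest, _, _ => ("", rest)
  | _ + 1, [], _, _ => ("", [])
  | f + 1, line :: rest, parent_indent, inside_call =>
      let content := PySem.Str.lstrip line
      if PySem.Str.startswith content "}" then
        let indent : Int := (PySem.Str.len line : Int) - (PySem.Str.len content : Int)
        if indent ≤ parent_indent then ("", line :: rest)  -- this '}' closes an enclosing call
        else
          let head := (if inside_call then ", " else "") ++ "co(" ++
            PySem.Str.strip (PySem.Str.slice content (some 1) none)
          let inner := B_parse f rest indent true
          let tail := B_parse f inner.2 parent_indent inside_call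
          (head ++ inner.1 ++ ")" ++ tail.1, tail.2)
      else
        let tail := B_parse f rest parent_indent inside_call
        (", " ++ content ++ tail.1, tail.2)

def parse_newlang_to_python_alt (input_code : String) : String :=
  -- split? is `some` here: the separator "\n" is non-empty
  let lines := ((PySem.Str.split? (PySem.Str.strip input_code) "\n").getD []).filter
    (fun l => PySem.Str.strip l != "")
  (B_parse (lines.length + 1) lines (-1) false).1

-- ===== PRECONDITION & SPEC =====
def Spec_parse_newlang_to_python (input_code : String) (out : String) : Prop := out = parse_newlang_to_python_alt input_code
instance (input_code : String) (out : String) : Decidable (Spec_parse_newlang_to_python input_code out) := by unfold Spec_parse_newlang_to_python; infer_instance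

-- ===== CLAIM (what is proved, stated in full; the proofs are below) =====
def Claim_equal_parse_newlang_to_python : Prop := ∀ (input_code : String), Dom_parse_newlang_to_python input_code → Spec_parse_newlang_to_python input_code (parse_newlang_to_python input_code)

-- ===== LEMMAS AND PROOFS =====

-- fuel does not matter once it exceeds the number of remaining lines
theorem B_rest_len (f : Nat) (ls : List String) (p : Int) (ic : Bool) :
    (B_parse f ls p ic).2.length ≤ ls.length := by
  induction f generalizing ls p ic with
  | zero => simp [B_parse]
  | succ f ih =>
    cases ls with
    | nil => simp [B_parse]
    | cons l rest =>
      by_cases hj : PySem.Str.startswith (PySem.Str.lstrip l) "}" = true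
      · by_cases hle : (PySem.Str.len l : Int) - (PySem.Str.len (PySem.Str.lstrip l) : Int) ≤ p
        · simp only [B_parse, if_pos hj, if_pos hle]
          simp
        · have h3 := ih rest ((PySem.Str.len l : Int) - (PySem.Str.len (PySem.Str.lstrip l) : Int)) true
          have h4 := ih (B_parse f rest ((PySem.Str.len l : Int) - (PySem.Str.len (PySem.Str.lstrip l) : Int)) true).2 p ic
          simp only [B_parse, if_pos hj, if_neg hle, List.length_cons]
          omega
      · have h3 := ih rest p ic
        simp only [B_parse, if_neg hj, List.length_cons]
        omega

theorem B_fuel (f g : Nat) (ls : List String) (p : Int) (ic : Bool)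
    (hf : ls.length < f) (hg : ls.length < g) :
    B_parse f ls p ic = B_parse g ls p ic := by
  induction f generalizing g ls p ic with
  | zero => omega
  | succ f ih =>
    cases g with
    | zero => omega
    | succ g =>
      cases ls with
      | nil => simp [B_parse]
      | cons l rest =>
        simp only [List.length_cons] at hf hg
        by_cases hj : PySem.Str.startswith (PySem.Str.lstrip l) "}" = true
        · by_cases hle : (PySem.Str.len l : Int) - (PySem.Str.len (PySem.Str.lstrip l) : Int) ≤ p
          · simp only [B_parse, if_pos hj, if_pos hle]
          · have e1 : B_parse f rest ((PySem.Str.len l : Int) - (PySem.Str.len (PySem.Str.lstrip l) : Int)) true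
                = B_parse g rest ((PySem.Str.len l : Int) - (PySem.Str.len (PySem.Str.lstrip l) : Int)) true :=
              ih g rest _ true (by omega) (by omega)
            have hl := B_rest_len f rest ((PySem.Str.len l : Int) - (PySem.Str.len (PySem.Str.lstrip l) : Int)) true
            have e2 : B_parse f (B_parse f rest ((PySem.Str.len l : Int) - (PySem.Str.len (PySem.Str.lstrip l) : Int)) true).2 p ic
                = B_parse g (B_parse f rest ((PySem.Str.len l : Int) - (PySem.Str.len (PySem.Str.lstrip l) : Int)) true).2 p ic :=
              ih g _ p ic (by omega) (by omega)
            simp only [B_parse, if_pos hj, if_neg hle]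
            rw [← e1, e2]
        · have e1 : B_parse f rest p ic = B_parse g rest p ic := ih g rest p ic (by omega) (by omega)
          simp only [B_parse, if_neg hj]
          rw [e1]

-- what the A-side loop will still emit, phrased through B: one `B_parse` level per stack entry
def Bside : List String → List (Int × String) → String
  | ls, [] => (B_parse (ls.length + 1) ls (-1) false).1
  | ls, (p, _) :: st =>
      let r := B_parse (ls.length + 1) ls p true
      r.1 ++ ")" ++ Bside r.2 st
termination_by ls st => ls.length + st.length
decreasing_by
  have := B_rest_len (ls.length + 1) ls p true
  simp
  omega

def AInv (st : List (Int × String)) : Prop :=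
  List.IsChain (fun a b => b.1 < a.1) st ∧ ∀ e ∈ st, 0 ≤ e.1

theorem joinNil (L : List (List Char)) : List.intercalate [] L = L.flatten := by
  induction L with
  | nil => rfl
  | cons h t ih => cases t <;> simp_all [List.intercalate]

theorem join_append (c : List String) (x : String) :
    PySem.Str.join "" (c ++ [x]) = PySem.Str.join "" c ++ x := by
  simp [PySem.Str.join, PySem.Chars.join, joinNil, String.ofList_append]

theorem indent_nonneg (l : String) :
    0 ≤ (PySem.Str.len l : Int) - (PySem.Str.len (PySem.Str.lstrip l) : Int) := by
  have h : (PySem.Str.lstrip l).toList = l.toList.dropWhile PySem.Chars.isspace := by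
    simp [PySem.Chars.lstrip]
  have := l.toList.length_dropWhile_le PySem.Chars.isspace
  simp only [PySem.Str.len_eq, h]
  omega

-- base case: the final drain equals Bside [] st
theorem base_case (st : List (Int × String)) (code : List String) :
    PySem.Str.join "" (A_final st code) = PySem.Str.join "" code ++ Bside [] st := by
  induction st generalizing code with
  | nil => simp [A_final, Bside, B_parse]
  | cons e st ih =>
    obtain ⟨p, s⟩ := e
    simp only [A_final, Bside, B_parse]
    rw [ih, join_append]
    simp [String.append_assoc]

-- peeling Bside when the head line closes the current level
theorem Bside_peel (l : String) (ls : List String) (p : Int) (s : String) (st : List (Int × String))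
    (hj : PySem.Str.startswith (PySem.Str.lstrip l) "}" = true)
    (hle : (PySem.Str.len l : Int) - (PySem.Str.len (PySem.Str.lstrip l) : Int) ≤ p) :
    Bside (l :: ls) ((p, s) :: st) = ")" ++ Bside (l :: ls) st := by
  simp only [Bside, B_parse, hj, if_pos hle, if_true]
  simp

-- Bside when the head line is an argument line
theorem Bside_arg (l : String) (ls : List String) (st : List (Int × String))
    (hj : ¬ PySem.Str.startswith (PySem.Str.lstrip l) "}" = true) :
    Bside (l :: ls) st = ", " ++ PySem.Str.lstrip l ++ Bside ls st := by
  cases st with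
  | nil =>
    simp only [Bside, List.length_cons, B_parse, if_neg hj]
  | cons e st' =>
    obtain ⟨p, s⟩ := e
    simp only [Bside, List.length_cons, B_parse, if_neg hj]
    simp [String.append_assoc]

-- main invariant lemma
theorem main_lemma (n : Nat) (ls : List String) (st : List (Int × String)) (code : List String)
    (hn : ls.length ≤ n) (hInv : AInv st)
    (hnb : ∀ l ∈ ls, PySem.Str.strip l ≠ "") :
    PySem.Str.join "" (A_final (List.foldl A_step (code, st) ls).2 (List.foldl A_step (code, st) ls).1)
      = PySem.Str.join "" code ++ Bside ls st := by
  induction n generalizing ls st code with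
  | zero =>
    have : ls = [] := List.eq_nil_of_length_eq_zero (Nat.le_zero.mp hn)
    subst this
    simpa using base_case st code
  | succ n ih =>
    cases ls with
    | nil => simpa using base_case st code
    | cons l ls' =>
      have hnbl : ¬ PySem.Str.strip l = "" := hnb l List.mem_cons_self
      have hnb' : ∀ x ∈ ls', PySem.Str.strip x ≠ "" := fun x hx => hnb x (List.mem_cons_of_mem _ hx)
      have hn' : ls'.length ≤ n := by simpa using hn
      have hind := indent_nonneg l
      by_cases hj : PySem.Str.startswith (PySem.Str.lstrip l) "}" = true
      · -- a '}' line: inner induction over the stack (the pop loop)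
        clear hn hnb
        induction st generalizing code with
        | nil =>
          have stepA : A_step (code, []) l
              = (code ++ ["" ++ "co(" ++ PySem.Str.strip (PySem.Str.slice (PySem.Str.lstrip l) (some 1) none)],
                 [((PySem.Str.len l : Int) - (PySem.Str.len (PySem.Str.lstrip l) : Int), "co(")]) := by
            simp only [A_step, if_neg hnbl, if_pos hj, A_pop]
            simp
          rw [List.foldl_cons, stepA,
            ih ls' _ _ hn' ⟨by simp, by intro e he; rw [List.mem_singleton] at he; subst he; exact hind⟩ hnb', join_append]
          have hgt : ¬ ((PySem.Str.len l : Int) - (PySem.Str.len (PySem.Str.lstrip l) : Int) ≤ (-1 : Int)) := by omega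
          simp only [Bside, List.length_cons, B_parse, if_pos hj, if_neg hgt]
          rw [B_fuel ((B_parse (ls'.length + 1) ls' ((PySem.Str.len l : Int) - (PySem.Str.len (PySem.Str.lstrip l) : Int)) true).2.length + 1)
                (ls'.length + 1) _ (-1) false (by omega)
                (by have := B_rest_len (ls'.length + 1) ls' ((PySem.Str.len l : Int) - (PySem.Str.len (PySem.Str.lstrip l) : Int)) true; omega)]
          simp [String.append_assoc]
        | cons e st' ihst =>
          obtain ⟨p, s⟩ := e
          have hInv' : AInv st' := ⟨hInv.1.tail, fun x hx => hInv.2 x (List.mem_cons_of_mem _ hx)⟩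
          by_cases hle : (PySem.Str.len l : Int) - (PySem.Str.len (PySem.Str.lstrip l) : Int) ≤ p
          · -- pop one stack entry, emit ')' and retry the same line
            have stepEq : A_step (code, (p, s) :: st') l = A_step (code ++ [")"], st') l := by
              simp only [A_step, if_neg hnbl, if_pos hj, A_pop, if_pos hle]
            rw [List.foldl_cons, stepEq, ← List.foldl_cons, ihst (code ++ [")"]) hInv',
              join_append, Bside_peel l ls' p s st' hj hle]
            simp [String.append_assoc]
          · -- open a new call on top of the non-empty stack
            have stepA : A_step (code, (p, s) :: st') l
                = (code ++ [", " ++ "co(" ++ PySem.Str.strip (PySem.Str.slice (PySem.Str.lstrip l) (some 1) none)],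
                   ((PySem.Str.len l : Int) - (PySem.Str.len (PySem.Str.lstrip l) : Int), "co(") :: (p, s) :: st') := by
              simp only [A_step, if_neg hnbl, if_pos hj, A_pop, if_neg hle]
              simp
            have hInvNew : AInv (((PySem.Str.len l : Int) - (PySem.Str.len (PySem.Str.lstrip l) : Int), "co(") :: (p, s) :: st') := by
              refine ⟨?_, ?_⟩
              · refine List.IsChain.cons hInv.1 ?_
                intro y hy
                simp only [List.head?_cons, Option.mem_some_iff] at hy
                subst hy
                simp only
                omega
              · intro x hx
                rcases List.mem_cons.mp hx with h | h
                · subst h; simpa using hind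
                · exact hInv.2 x h
            rw [List.foldl_cons, stepA, ih ls' _ _ hn' hInvNew hnb', join_append]
            have r2len := B_rest_len (ls'.length + 1) ls' ((PySem.Str.len l : Int) - (PySem.Str.len (PySem.Str.lstrip l) : Int)) true
            simp only [Bside, List.length_cons, B_parse, if_pos hj, if_neg hle]
            rw [B_fuel ((B_parse (ls'.length + 1) ls' ((PySem.Str.len l : Int) - (PySem.Str.len (PySem.Str.lstrip l) : Int)) true).2.length + 1)
                  (ls'.length + 1) _ p true (by omega) (by omega)]
            simp [String.append_assoc]
      · -- an argument line
        have stepA : A_step (code, st) l = (code ++ [", " ++ PySem.Str.lstrip l], st) := by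
          cases st <;> simp only [A_step, if_neg hnbl, if_neg hj]
        rw [List.foldl_cons, stepA, ih ls' _ _ hn' hInv hnb', join_append,
          Bside_arg l ls' st hj]
        simp [String.append_assoc]

theorem A_skip_blank (ls : List String) (acc : List String × List (Int × String)) :
    List.foldl A_step acc ls
      = List.foldl A_step acc (ls.filter (fun l => PySem.Str.strip l != "")) := by
  induction ls generalizing acc with
  | nil => rfl
  | cons l ls ih =>
    by_cases h : PySem.Str.strip l = ""
    · simp only [List.filter_cons, h]
      have : A_step acc l = acc := by
        obtain ⟨c, s⟩ := acc
        simp [A_step, h]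
      simp [List.foldl_cons, this, ih]
    · simp only [List.filter_cons]
      have hb : (PySem.Str.strip l != "") = true := by simpa using h
      simp [hb, List.foldl_cons, ih]

-- ===== VERDICT (by name: the statement is the Claim_ definition above) =====
theorem parse_newlang_to_python_spec : Claim_equal_parse_newlang_to_python := by
  intro input_code _
  unfold Spec_parse_newlang_to_python parse_newlang_to_python parse_newlang_to_python_alt
  dsimp only
  rw [A_skip_blank]
  have h := main_lemma ((((PySem.Str.split? (PySem.Str.strip input_code) "\n").getD []).filter (fun l => PySem.Str.strip l != "")).length)
    (((PySem.Str.split? (PySem.Str.strip input_code) "\n").getD []).filter (fun l => PySem.Str.strip l != ""))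
    [] [] le_rfl ⟨by simp, by simp⟩
    (by intro l hl; have := List.of_mem_filter hl; simpa using this)
  rw [h]
  simp [Bside, PySem.Str.join, PySem.Chars.join, List.intercalate]
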